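-- pv_equiv track=rewrite | github.com/noopurm912/Scientific_computing_prog_600 | flasky.py | string_cut
-- ===== SOURCE A (Python) =====
-- def string_cut(str_cut):
--     new_str = ""
--     i = 0
--     for item in str_cut:
--         str_cut = str_cut[i:]
--         if i == 2:
--             new_str += item
--             i = 0
--         else:
--             i += 1
--     return new_str
-- ===== SOURCE B (Python) =====
-- def string_cut(str_cut):
--     return "".join(str_cut[i] for i in range(2, len(str_cut), 3))
-- ===== Notes on version B (the rewrite author's own statement) =====
-- stated objective: faster
-- what changed: Replaces the character scan with a stateful modular counter (which re-slices the remaining string every iteration, making A quadratic) by a direct join over the arithmetic index range range(2, len, 3).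
import Mathlib
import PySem

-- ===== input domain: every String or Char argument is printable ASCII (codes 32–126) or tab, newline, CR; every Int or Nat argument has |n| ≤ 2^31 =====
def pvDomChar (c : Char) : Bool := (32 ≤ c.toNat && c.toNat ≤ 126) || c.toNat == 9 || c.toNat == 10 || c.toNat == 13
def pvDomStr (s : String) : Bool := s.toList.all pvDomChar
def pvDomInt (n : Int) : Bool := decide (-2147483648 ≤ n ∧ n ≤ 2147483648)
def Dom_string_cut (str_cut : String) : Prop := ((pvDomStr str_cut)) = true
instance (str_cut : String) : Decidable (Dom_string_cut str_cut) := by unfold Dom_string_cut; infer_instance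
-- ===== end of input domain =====

-- B replaces A's stateful modular counter (and dead per-step re-slicing) by a direct join
-- over the arithmetic index range range(2, len, 3); objective: faster (drops A's quadratic per-step re-slicing).


-- ===== PORT A =====
-- for item in str_cut: str_cut = str_cut[i:]; if i == 2: new_str += item; i = 0 else: i += 1
-- (iteration is over a snapshot of the original string; the reassignment only rebinds the local)
def string_cut (str_cut : String) : String :=
  String.ofList
    ((str_cut.toList.foldl
      (fun (st : List Char × Int × List Char) item =>
        let s' := PySem.List.slice st.1 (some st.2.1) none
        if st.2.1 = 2 then (s', 0, st.2.2 ++ [item])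
        else (s', st.2.1 + 1, st.2.2))
      (str_cut.toList, 0, ([] : List Char))).2.2)

-- ===== PORT B =====
-- "".join(str_cut[i] for i in range(2, len(str_cut), 3))
def string_cut_alt (str_cut : String) : String :=
  String.ofList
    ((PySem.List.pyRange 2 (PySem.Str.len str_cut) 3).map
      (fun i => PySem.List.pyGetD str_cut.toList i ' '))

-- ===== PRECONDITION & SPEC =====
def Spec_string_cut (str_cut : String) (out : String) : Prop := out = string_cut_alt str_cut
instance (str_cut : String) (out : String) : Decidable (Spec_string_cut str_cut out) := by unfold Spec_string_cut; infer_instance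

-- ===== CLAIM (what is proved, stated in full; the proofs are below) =====
def Claim_equal_string_cut : Prop := ∀ (str_cut : String), Dom_string_cut str_cut → Spec_string_cut str_cut (string_cut str_cut)

-- ===== LEMMAS AND PROOFS =====

/-- Every third element, starting the counter at `i` (matches A's loop body). -/
def pickAux : Int → List Char → List Char
  | _, [] => []
  | i, x :: xs => if i = 2 then x :: pickAux 0 xs else pickAux (i + 1) xs

lemma foldA_eq (l : List Char) : ∀ (cur : List Char) (i : Int) (acc : List Char),
    (l.foldl
      (fun (st : List Char × Int × List Char) item =>
        let s' := PySem.List.slice st.1 (some st.2.1) none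
        if st.2.1 = 2 then (s', 0, st.2.2 ++ [item])
        else (s', st.2.1 + 1, st.2.2))
      (cur, i, acc)).2.2 = acc ++ pickAux i l := by
  induction l with
  | nil => intro cur i acc; simp [pickAux]
  | cons x xs ih =>
    intro cur i acc
    by_cases h : i = 2 <;> simp [List.foldl, pickAux, h, ih]

lemma pyGetD_cons_succ {α : Type} (x : α) (xs : List α) (j : Int) (d : α) (h : 0 ≤ j) :
    PySem.List.pyGetD (x :: xs) (j + 1) d = PySem.List.pyGetD xs j d := by
  obtain ⟨n, rfl⟩ := Int.eq_ofNat_of_zero_le h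
  have : ((n : Int) + 1) = ((n + 1 : Nat) : Int) := by push_cast; ring
  rw [this, PySem.List.pyGetD_natCast, PySem.List.pyGetD_natCast]
  simp [List.getD]

lemma step3_nil (a b : Int) (h : b ≤ a) : PySem.List.pyRange a b 3 = [] := by
  rw [PySem.List.pyRange_of_pos a b (by norm_num)]
  simp [show ¬ a < b by omega]

lemma step3_cons (a b : Int) (h : a < b) :
    PySem.List.pyRange a b 3 = a :: PySem.List.pyRange (a + 3) b 3 := by
  rw [PySem.List.pyRange_of_pos a b (by norm_num),
      PySem.List.pyRange_of_pos (a + 3) b (by norm_num)]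
  have hn : (if a < b then ((b - a + 3 - 1) / 3).toNat else 0)
      = (if a + 3 < b then ((b - (a + 3) + 3 - 1) / 3).toNat else 0) + 1 := by
    by_cases h3 : a + 3 < b <;> simp [h, h3] <;> omega
  rw [hn, List.range_succ_eq_map, List.map_cons, List.map_map]
  refine congrArg₂ List.cons (by push_cast; ring) ?_
  apply List.map_congr_left; intro k _; simp only [Function.comp]; push_cast; ring

lemma B_eq : ∀ (n : Nat) (l : List Char), l.length = n →
    (PySem.List.pyRange 2 (l.length : Int) 3).map (fun j => PySem.List.pyGetD l j ' ')
      = pickAux 0 l := by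
  intro n
  induction n using Nat.strong_induction_on with
  | _ n ih =>
    intro l hl
    match l with
    | [] => simp [step3_nil 2 0 (by omega), pickAux]
    | [a] => simp [step3_nil 2 1 (by omega), pickAux]
    | [a, b] => simp [step3_nil 2 2 (by omega), pickAux]
    | a :: b :: c :: rest =>
      have hlen : ((a :: b :: c :: rest).length : Int) = (rest.length : Int) + 3 := by
        simp; ring
      rw [hlen, step3_cons 2 ((rest.length : Int) + 3) (by omega)]
      have hshift : PySem.List.pyRange (2 + 3) ((rest.length : Int) + 3) 3
          = (PySem.List.pyRange 2 (rest.length : Int) 3).map (fun j => j + 3) := by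
        rw [PySem.List.pyRange_of_pos 2 (rest.length : Int) (by norm_num),
            PySem.List.pyRange_of_pos (2 + 3) ((rest.length : Int) + 3) (by norm_num)]
        have : (if 2 + 3 < (rest.length : Int) + 3 then (((rest.length : Int) + 3 - (2 + 3) + 3 - 1) / 3).toNat else 0)
            = (if 2 < (rest.length : Int) then (((rest.length : Int) - 2 + 3 - 1) / 3).toNat else 0) := by
          by_cases h2 : 2 < (rest.length : Int)
          · have h2' : (2 : Int) + 3 < (rest.length : Int) + 3 := by omega
            simp only [if_pos h2, if_pos h2']
            congr 1; omega
          · have h2' : ¬ ((2 : Int) + 3 < (rest.length : Int) + 3) := by omega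
            simp only [if_neg h2, if_neg h2']
        rw [this, List.map_map]
        apply List.map_congr_left; intro k _; simp [Function.comp]; ring
      rw [hshift, List.map_cons, List.map_map]
      have hmap : ∀ j ∈ PySem.List.pyRange 2 (rest.length : Int) 3,
          ((fun j => PySem.List.pyGetD (a :: b :: c :: rest) j ' ') ∘ (fun j => j + 3)) j
            = PySem.List.pyGetD rest j ' ' := by
        intro j hj
        have h2j : 2 ≤ j := ((PySem.List.mem_pyRange_iff_of_pos (by norm_num) j).mp hj).1
        simp only [Function.comp]
        have e1 : j + 3 = (j + 2) + 1 := by ring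
        have e2 : j + 2 = (j + 1) + 1 := by ring
        have e3 : (j + 1 : Int) = j + 1 := rfl
        rw [e1, pyGetD_cons_succ _ _ _ _ (by omega), e2,
            pyGetD_cons_succ _ _ _ _ (by omega),
            pyGetD_cons_succ _ _ _ _ (by omega)]
      rw [List.map_congr_left hmap]
      have hc : PySem.List.pyGetD (a :: b :: c :: rest) 2 ' ' = c := by
        rw [show (2 : Int) = ((2 : Nat) : Int) from rfl, PySem.List.pyGetD_natCast]; rfl
      have hrest : rest.length < n := by simp at hl; omega
      simp only [pickAux, if_neg (by norm_num : (0 : Int) ≠ 2),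
        if_neg (by norm_num : (0 : Int) + 1 ≠ 2)]
      rw [hc, ih rest.length hrest rest rfl]
      norm_num

-- ===== VERDICT (by name: the statement is the Claim_ definition above) =====
theorem string_cut_spec : Claim_equal_string_cut := by
  intro s _
  unfold Spec_string_cut string_cut string_cut_alt
  rw [foldA_eq]
  have hlen : PySem.Str.len s = (s.toList.length : Int) := by simp [PySem.Str.len_eq]
  rw [hlen, B_eq s.toList.length s.toList rfl, List.nil_append]
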